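-- pv_equiv track=rewrite | github.com/dangun/adventofcode2021 | 16/16-1.py | read_packet
-- ===== SOURCE A (Python) =====
-- def read(p, x, input):
--     output = input[p:p+x]
--     p += x
--     return p, output
--
-- def read_packet(input, p, max_read = -1):
--     vers_count = 0
--     sub_read = 0
--     while len(input) - 10 > p and not max_read == sub_read:
--         p, version = read(p, 3, input)
--         version = int('0b' + version, base = 0)
--         vers_count += version
--         p, packet_type = read(p, 3, input)
--         packet_type = int('0b' + packet_type, base = 0)
--
--         if packet_type == 4:
--             literals = []
--             last = False
--             while not last:
--                 p, last = read(p, 1, input)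
--                 last = last == '0'
--                 p, literal = read(p, 4, input)
--                 literals.append(literal)
--         elif packet_type != 4:
--             p, length_type_id = read(p, 1, input)
--             if length_type_id == '0':
--                 p, length = read(p, 15, input)
--                 length = int('0b' + length, base = 0)
--                 p_add, vers_add = read_packet(input[p:p+length], 0)
--                 vers_count += vers_add
--                 p += length
--             else:
--                 p, num_sub = read(p, 11, input)
--                 num_sub = int('0b' + num_sub, base = 0)
--                 p_add, vers_add = read_packet(input[p:], 0, max_read=num_sub)
--                 vers_count += vers_add
--                 p += p_add
--         sub_read += 1
--     return p, vers_count
-- ===== SOURCE B (Python) =====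
-- # Two-pass rewrite: pass 1 builds a forest of (version, children) nodes with the
-- # same cursor arithmetic and bit-field decoding as the original; pass 2 is a
-- # separate fold summing the version fields of the forest.
-- def _bin(bits):
--     return int('0b' + bits, base=0)
--
-- def _parse_nodes(input, p, max_read):
--     nodes = []
--     sub_read = 0
--     while len(input) - 10 > p and sub_read != max_read:
--         version = _bin(input[p:p + 3])
--         packet_type = _bin(input[p + 3:p + 6])
--         p += 6
--         if packet_type == 4:
--             while True:
--                 last = input[p:p + 1] == '0'
--                 p += 5
--                 if last:
--                     break
--             nodes.append((version, []))
--         else: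
--             length_type_id = input[p:p + 1]
--             p += 1
--             if length_type_id == '0':
--                 length = _bin(input[p:p + 15])
--                 p += 15
--                 children, _ = _parse_nodes(input[p:p + length], 0, -1)
--                 nodes.append((version, children))
--                 p += length
--             else:
--                 num_sub = _bin(input[p:p + 11])
--                 p += 11
--                 children, p_add = _parse_nodes(input[p:], 0, num_sub)
--                 nodes.append((version, children))
--                 p += p_add
--         sub_read += 1
--     return nodes, p
--
-- def _sum_versions(nodes):
--     return sum(v + _sum_versions(children) for v, children in nodes)
--
-- def read_packet(input, p, max_read=-1):
--     nodes, p_end = _parse_nodes(input, p, max_read)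
--     return p_end, _sum_versions(nodes)
-- ===== Notes on version B (the rewrite author's own statement) =====
-- stated objective: alternative
-- what changed: A sums version numbers inside one fused parse loop; B is two passes: a recursive parser that builds a forest of (version, children) nodes with the same cursor arithmetic, then a separate fold that sums the version fields of the forest.
-- outside the precondition, e.g. on read_packet('110100101111111000101xyz', 0, -1): A returns (21, 6), B returns (21, 6); on read_packet('11101110001011', -7, -1): A returns (11, 0), B returns (11, 0); on read_packet('hello world', 0, -1): A raises ValueError, B raises ValueError
import Mathlib
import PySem

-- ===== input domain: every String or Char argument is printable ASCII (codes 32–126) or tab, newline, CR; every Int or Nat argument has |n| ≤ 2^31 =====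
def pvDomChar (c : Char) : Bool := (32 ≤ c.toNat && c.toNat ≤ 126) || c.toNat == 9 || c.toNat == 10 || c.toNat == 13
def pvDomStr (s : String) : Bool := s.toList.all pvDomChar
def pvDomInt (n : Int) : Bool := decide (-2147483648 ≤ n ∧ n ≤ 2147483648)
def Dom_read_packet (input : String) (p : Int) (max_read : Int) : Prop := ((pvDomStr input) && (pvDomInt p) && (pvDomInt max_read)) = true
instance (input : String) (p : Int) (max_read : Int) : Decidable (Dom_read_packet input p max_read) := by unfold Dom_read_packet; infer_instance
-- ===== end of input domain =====

-- B is a two-pass rewrite of A's fused parse-and-sum loop: a recursive parser that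
-- builds a forest of (version, children) nodes, then a separate fold summing the
-- version fields (objective: alternative decomposition; equality of RETURN values).

-- ===== PORT A =====
-- int('0b' + s, base = 0) ; none = ValueError (outside Pre_; both Pythons call the same int on the same slices)
def pvBin (cs : List Char) : Int := (PySem.Int.ofCharsBase? ('0' :: 'b' :: cs) 0).getD 0

-- helper `read`: returns (p + x, input[p:p+x])
def pvReadA (p x : Int) (cs : List Char) : Int × List Char :=
  (p + x, PySem.List.slice cs (some p) (some (p + x)))

-- the inner `while not last` literal loop; fuel-bounded (Python diverges when the
-- groups run past the end with no stop bit; such inputs are outside Pre_)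
def pvLitA (cs : List Char) (fuel : Nat) (p : Int) (acc : List (List Char)) : Int × List (List Char) :=
  match fuel with
  | 0 => (p, acc)
  | f + 1 =>
    let r1 := pvReadA p 1 cs
    let last := r1.2 = ['0']
    let r2 := pvReadA r1.1 4 cs
    let acc' := acc ++ [r2.2]
    if last then (r2.1, acc') else pvLitA cs f r2.1 acc'

-- the outer `while` loop of read_packet, fuel-bounded (fuel is never exhausted on terminating Python runs)
def pvGoA (fuel : Nat) (cs : List Char) (p max_read sub_read vers_count : Int) : Int × Int :=
  if ((cs.length : Int) - 10 > p ∧ ¬(max_read = sub_read)) then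
    match fuel with
    | 0 => (p, vers_count)
    | f + 1 =>
      let r1 := pvReadA p 3 cs
      let version := pvBin r1.2
      let vc := vers_count + version
      let r2 := pvReadA r1.1 3 cs
      let packet_type := pvBin r2.2
      if packet_type = 4 then
        let lit := pvLitA cs f r2.1 []
        pvGoA f cs lit.1 max_read (sub_read + 1) vc
      else if ¬(packet_type = 4) then
        let r3 := pvReadA r2.1 1 cs
        if r3.2 = ['0'] then
          let r4 := pvReadA r3.1 15 cs
          let length := pvBin r4.2
          let sub := pvGoA f (PySem.List.slice cs (some r4.1) (some (r4.1 + length))) 0 (-1) 0 0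
          pvGoA f cs (r4.1 + length) max_read (sub_read + 1) (vc + sub.2)
        else
          let r4 := pvReadA r3.1 11 cs
          let num_sub := pvBin r4.2
          let sub := pvGoA f (PySem.List.slice cs (some r4.1) none) 0 num_sub 0 0
          pvGoA f cs (r4.1 + sub.1) max_read (sub_read + 1) (vc + sub.2)
      else pvGoA f cs r2.1 max_read (sub_read + 1) vc
  else (p, vers_count)
termination_by fuel

def read_packet (input : String) (p : Int) (max_read : Int) : Int × Int :=
  pvGoA (input.toList.length + 1) input.toList p max_read 0 0

-- ===== PORT B =====
-- forest of (version, children, rest) nodes built by pass 1 of B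
inductive PvForest : Type
  | nil : PvForest
  | node : Int → PvForest → PvForest → PvForest
deriving DecidableEq, Repr

-- pass 2: _sum_versions
def pvSumF : PvForest → Int
  | .nil => 0
  | .node v c r => v + pvSumF c + pvSumF r

-- B's literal-group loop
def pvLitB (fuel : Nat) (cs : List Char) (p : Int) : Int :=
  match fuel with
  | 0 => p
  | f + 1 =>
    let last := PySem.List.slice cs (some p) (some (p + 1)) = ['0']
    if last then p + 5 else pvLitB f cs (p + 5)

-- pass 1: _parse_nodes, fuel-bounded like pvGoA
def pvParseB (fuel : Nat) (cs : List Char) (p max_read sub_read : Int) : PvForest × Int :=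
  if ((cs.length : Int) - 10 > p ∧ ¬(sub_read = max_read)) then
    match fuel with
    | 0 => (.nil, p)
    | f + 1 =>
      let version := pvBin (PySem.List.slice cs (some p) (some (p + 3)))
      let packet_type := pvBin (PySem.List.slice cs (some (p + 3)) (some (p + 6)))
      if packet_type = 4 then
        let p' := pvLitB f cs (p + 6)
        let rest := pvParseB f cs p' max_read (sub_read + 1)
        (.node version .nil rest.1, rest.2)
      else
        let ltid := PySem.List.slice cs (some (p + 6)) (some (p + 7))
        if ltid = ['0'] then
          let length := pvBin (PySem.List.slice cs (some (p + 7)) (some (p + 22)))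
          let children := pvParseB f (PySem.List.slice cs (some (p + 22)) (some (p + 22 + length))) 0 (-1) 0
          let rest := pvParseB f cs (p + 22 + length) max_read (sub_read + 1)
          (.node version children.1 rest.1, rest.2)
        else
          let num_sub := pvBin (PySem.List.slice cs (some (p + 7)) (some (p + 18)))
          let children := pvParseB f (PySem.List.slice cs (some (p + 18)) none) 0 num_sub 0
          let rest := pvParseB f cs (p + 18 + children.2) max_read (sub_read + 1)
          (.node version children.1 rest.1, rest.2)
  else (.nil, p)
termination_by fuel

def read_packet_alt (input : String) (p : Int) (max_read : Int) : Int × Int :=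
  let r := pvParseB (input.toList.length + 1) input.toList p max_read 0
  (r.2, pvSumF r.1)

-- ===== PRECONDITION & SPEC =====
-- Pre_ restricts to the parser's natural domain: either the loop never runs, or a
-- nonnegative cursor into an all-binary string.  Outside it A raises ValueError on
-- most inputs (non-'0'/'1' characters reached by int, or empty slices produced by a
-- negative cursor); where A happens to return anyway (non-binary characters the loop
-- never reads, or a negative cursor whose Python-slice wraparound stays aligned), B
-- returns the same value — see the cites.  A can still diverge on some admitted
-- binary strings (a literal-group run past the end); A returns nothing there.
def Pre_read_packet (input : String) (p : Int) (max_read : Int) : Prop :=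
  (max_read = 0 ∨ (input.toList.length : Int) - 10 ≤ p) ∨
  (0 ≤ p ∧ input.toList.all (fun c => c == '0' || c == '1') = true)
instance (input : String) (p : Int) (max_read : Int) : Decidable (Pre_read_packet input p max_read) := by
  unfold Pre_read_packet; infer_instance

def pvWitness_read_packet : String × Int × Int := ("110100101111111000101", 0, -1)

def Spec_read_packet (input : String) (p : Int) (max_read : Int) (out : Int × Int) : Prop := out = read_packet_alt input p max_read
instance (input : String) (p : Int) (max_read : Int) (out : Int × Int) : Decidable (Spec_read_packet input p max_read out) := by unfold Spec_read_packet; infer_instance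

-- ===== CLAIM (what is proved, stated in full; the proofs are below) =====
def Claim_equal_read_packet : Prop := ∀ (input : String) (p : Int) (max_read : Int), Dom_read_packet input p max_read → Pre_read_packet input p max_read → Spec_read_packet input p max_read (read_packet input p max_read)

-- ===== LEMMAS AND PROOFS =====

-- the two literal-group loops advance the cursor identically
lemma pvLit_eq (f : Nat) (cs : List Char) : ∀ (p : Int) (acc : List (List Char)),
    (pvLitA cs f p acc).1 = pvLitB f cs p := by
  induction f with
  | zero => intro p acc; rfl
  | succ f ih =>
    intro p acc
    rw [pvLitA, pvLitB]
    simp only [pvReadA]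
    have h1 : p + 1 + 4 = p + 5 := by ring
    rw [h1]
    split_ifs with h <;> simp [ih]

-- the key invariant: A's fused loop equals B's parser with the accumulated sum added
lemma pv_key (f : Nat) : ∀ (cs : List Char) (p mr sr v : Int),
    pvGoA f cs p mr sr v
      = ((pvParseB f cs p mr sr).2, v + pvSumF (pvParseB f cs p mr sr).1) := by
  induction f with
  | zero =>
    intro cs p mr sr v
    rw [pvGoA.eq_def, pvParseB.eq_def]
    by_cases h : ((cs.length : Int) - 10 > p ∧ ¬(mr = sr))
    · rw [if_pos h, if_pos ⟨h.1, fun he => h.2 he.symm⟩]; simp [pvSumF]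
    · have h' : ¬((cs.length : Int) - 10 > p ∧ ¬(sr = mr)) := by
        intro hc; exact h ⟨hc.1, fun he => hc.2 he.symm⟩
      rw [if_neg h, if_neg h']; simp [pvSumF]
  | succ f ih =>
    intro cs p mr sr v
    by_cases h : ((cs.length : Int) - 10 > p ∧ ¬(mr = sr))
    · rw [pvGoA.eq_def, if_pos h, pvParseB.eq_def, if_pos ⟨h.1, fun he => h.2 he.symm⟩]
      simp only [pvReadA]
      have e1 : p + 3 + 3 = p + 6 := by ring
      have e2 : p + 6 + 1 = p + 7 := by ring
      have e3 : p + 7 + 15 = p + 22 := by ring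
      have e4 : p + 7 + 11 = p + 18 := by ring
      rw [e1]
      by_cases h4 : pvBin (PySem.List.slice cs (some (p + 3)) (some (p + 6))) = 4
      · rw [if_pos h4, if_pos h4]
        rw [pvLit_eq, ih]
        simp [pvSumF]; ring
      · rw [if_neg h4, if_pos h4, if_neg h4]   -- dead `elif` branch of A
        rw [e2]
        by_cases h0 : PySem.List.slice cs (some (p + 6)) (some (p + 7)) = ['0']
        · rw [e3, if_pos h0, if_pos h0, ih, ih]
          simp [pvSumF]; ring
        · rw [e4, if_neg h0, if_neg h0, ih, ih]
          simp [pvSumF]; ring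
    · have h' : ¬((cs.length : Int) - 10 > p ∧ ¬(sr = mr)) := by
        intro hc; exact h ⟨hc.1, fun he => hc.2 he.symm⟩
      rw [pvGoA.eq_def, if_neg h, pvParseB.eq_def, if_neg h']
      simp [pvSumF]

-- ===== VERDICT (by name: the statement is the Claim_ definition above) =====
theorem read_packet_spec : Claim_equal_read_packet := by
  intro input p mr _hdom _hpre
  unfold Spec_read_packet read_packet read_packet_alt
  rw [pv_key]
  simp
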